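-- pv_equiv track=rewrite | github.com/JacksonTangs/RelaNet | dns_parse.py | deal_domain_name
-- ===== SOURCE A (Python) =====
-- def deal_domain_name(offset_pointer,row,type_flag_array):
--     if int(row[offset_pointer]) != 0:
--         for i in range(0,int(row[offset_pointer])+1):
--             type_flag_array.append(1)#添加dns域名为可变字段
--         offset_pointer =  offset_pointer + int(row[offset_pointer]) + 1
--         return deal_domain_name(offset_pointer,row,type_flag_array)
--     else :
--         return offset_pointer,type_flag_array
-- ===== SOURCE B (Python) =====
-- def deal_domain_name(offset_pointer, row, type_flag_array):
--     # Iterative while-loop with block extend instead of tail recursion with a per-element append loop.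
--     while True:
--         n = int(row[offset_pointer])
--         if n == 0:
--             return offset_pointer, type_flag_array
--         type_flag_array.extend([1] * (n + 1))
--         offset_pointer += n + 1
-- ===== Notes on version B (the rewrite author's own statement) =====
-- stated objective: simpler
-- what changed: Replaces the tail recursion with a flat while-loop and replaces the per-element append for-loop by a single block extend of [1]*(n+1); Pre_ admits exactly the inputs whose label chain reaches a zero byte in range (elsewhere A raises IndexError/RecursionError or diverges).
import Mathlib
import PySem

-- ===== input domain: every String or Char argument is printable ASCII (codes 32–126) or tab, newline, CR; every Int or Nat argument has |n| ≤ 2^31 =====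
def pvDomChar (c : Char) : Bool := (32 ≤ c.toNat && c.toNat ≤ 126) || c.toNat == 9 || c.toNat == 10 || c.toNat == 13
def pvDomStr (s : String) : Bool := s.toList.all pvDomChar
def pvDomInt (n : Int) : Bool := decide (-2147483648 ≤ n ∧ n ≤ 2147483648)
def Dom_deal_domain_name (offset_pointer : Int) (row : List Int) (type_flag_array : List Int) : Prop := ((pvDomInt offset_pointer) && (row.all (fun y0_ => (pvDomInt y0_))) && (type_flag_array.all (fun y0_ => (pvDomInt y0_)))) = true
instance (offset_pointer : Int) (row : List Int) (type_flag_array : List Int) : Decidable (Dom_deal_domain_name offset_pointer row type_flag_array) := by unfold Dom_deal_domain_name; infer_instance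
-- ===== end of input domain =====

-- B replaces A's tail recursion + per-element append loop by a flat while-loop doing one block
-- extend per label; return values (and list mutation) agree on every input where A returns.

-- ===== PORT A =====
-- A's unbounded tail recursion is totalised with fuel 2*|row|+1; a terminating chain visits
-- distinct in-range positions, of which there are at most 2*|row|, so on Pre_ the fuel never runs out.
def dealRecA (fuel : Nat) (offset_pointer : Int) (row : List Int) (type_flag_array : List Int) : Int × List Int :=
  match fuel with
  | 0 => (offset_pointer, type_flag_array)
  | fuel + 1 =>
    match PySem.List.pyGet? row offset_pointer with
    | none => (offset_pointer, type_flag_array)  -- row[offset_pointer] raises IndexError (outside Pre_)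
    | some v =>
      if v ≠ 0 then
        -- for i in range(0, v+1): type_flag_array.append(1)
        let tfa := (PySem.List.pyRange 0 (v + 1) 1).foldl (fun acc _ => acc ++ [1]) type_flag_array
        dealRecA fuel (offset_pointer + v + 1) row tfa
      else
        (offset_pointer, type_flag_array)

def deal_domain_name (offset_pointer : Int) (row : List Int) (type_flag_array : List Int) : Int × List Int :=
  dealRecA (2 * row.length + 1) offset_pointer row type_flag_array

-- ===== PORT B =====
-- B's 'while True' loop, rendered as a fuelled fold over unit ticks carrying (done, offset, flags);
-- once the zero byte returns, the state is frozen.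
def stepB (row : List Int) (s : Bool × Int × List Int) : Bool × Int × List Int :=
  match s with
  | (true, q, t) => (true, q, t)
  | (false, q, t) =>
    match PySem.List.pyGet? row q with
    | none => (true, q, t)  -- row[q] raises IndexError (outside Pre_)
    | some n =>
      if n == 0 then (true, q, t)
      else (false, q + n + 1, t ++ List.replicate (n + 1).toNat 1)  -- extend([1] * (n+1))

def deal_domain_name_alt (offset_pointer : Int) (row : List Int) (type_flag_array : List Int) : Int × List Int :=
  let res := (List.replicate (2 * row.length + 1) ()).foldl (fun s _ => stepB row s) (false, offset_pointer, type_flag_array)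
  (res.2.1, res.2.2)

-- ===== PRECONDITION & SPEC =====
-- chainOkB row k p: following p ↦ p + row[p] + 1 through k nonzero in-range bytes lands on a zero byte.
def chainOkB (row : List Int) : Nat → Int → Bool
  | 0, p => PySem.List.pyGet? row p == some 0
  | k + 1, p =>
    match PySem.List.pyGet? row p with
    | none => false
    | some v => v != 0 && chainOkB row k (p + v + 1)

-- Pre_: the label chain starting at offset_pointer reaches a zero byte while staying in range
-- (a terminating chain visits ≤ 2*|row| distinct in-range positions, hence the bound);
-- elsewhere A raises IndexError / RecursionError or loops forever.
def Pre_deal_domain_name (offset_pointer : Int) (row : List Int) (type_flag_array : List Int) : Prop :=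
  ((List.range (2 * row.length + 1)).any (fun k => chainOkB row k offset_pointer)) = true
instance (offset_pointer : Int) (row : List Int) (type_flag_array : List Int) : Decidable (Pre_deal_domain_name offset_pointer row type_flag_array) := by unfold Pre_deal_domain_name; infer_instance

def pvWitness_deal_domain_name : Int × List Int × List Int := (0, [2, 7, 7, 1, 9, 0], [5])

def Spec_deal_domain_name (offset_pointer : Int) (row : List Int) (type_flag_array : List Int) (out : Int × List Int) : Prop := out = deal_domain_name_alt offset_pointer row type_flag_array
instance (offset_pointer : Int) (row : List Int) (type_flag_array : List Int) (out : Int × List Int) : Decidable (Spec_deal_domain_name offset_pointer row type_flag_array out) := by unfold Spec_deal_domain_name; infer_instance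

-- ===== CLAIM (what is proved, stated in full; the proofs are below) =====
def Claim_equal_deal_domain_name : Prop := ∀ (offset_pointer : Int) (row : List Int) (type_flag_array : List Int), Dom_deal_domain_name offset_pointer row type_flag_array → Pre_deal_domain_name offset_pointer row type_flag_array → Spec_deal_domain_name offset_pointer row type_flag_array (deal_domain_name offset_pointer row type_flag_array)

-- ===== LEMMAS AND PROOFS =====

-- Reference run: k steps of the chain, appending (v+1).toNat ones per step.
def runSpec (row : List Int) : Nat → Int → List Int → Int × List Int
  | 0, p, t => (p, t)
  | k + 1, p, t =>
    let v := (PySem.List.pyGet? row p).getD 0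
    runSpec row k (p + v + 1) (t ++ List.replicate (v + 1).toNat 1)

theorem foldl_append_one (l : List Int) (t : List Int) :
    l.foldl (fun acc _ => acc ++ [1]) t = t ++ List.replicate l.length 1 := by
  induction l generalizing t with
  | nil => simp
  | cons x xs ih => simp [List.foldl, ih, List.append_assoc, List.replicate_succ]

theorem dealRecA_eq_runSpec (row : List Int) (k : Nat) (p : Int) (t : List Int) (fuel : Nat)
    (hc : chainOkB row k p = true) (hf : k < fuel) :
    dealRecA fuel p row t = runSpec row k p t := by
  induction k generalizing p t fuel with
  | zero =>
    match fuel, hf with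
    | fuel + 1, _ =>
      simp only [chainOkB, beq_iff_eq] at hc
      simp [dealRecA, runSpec, hc]
  | succ k ih =>
    match fuel, hf with
    | fuel + 1, hf =>
      simp only [chainOkB] at hc
      cases hg : PySem.List.pyGet? row p with
      | none => simp [hg] at hc
      | some v =>
        rw [hg] at hc
        obtain ⟨hne, hrest⟩ := Bool.and_eq_true_iff.mp hc
        have hne' : v ≠ 0 := by simpa using hne
        simp only [dealRecA, hg, hne', ne_eq, not_false_eq_true, if_pos]
        rw [foldl_append_one, PySem.List.length_pyRange_one]
        have := ih (p + v + 1) (t ++ List.replicate (v + 1 - 0).toNat 1) fuel hrest (by omega)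
        simpa [runSpec, hg] using this

theorem loopB_succ (row : List Int) (fuel : Nat) (s : Bool × Int × List Int) :
    (List.replicate (fuel + 1) ()).foldl (fun s _ => stepB row s) s =
      (List.replicate fuel ()).foldl (fun s _ => stepB row s) (stepB row s) := by
  simp [List.replicate_succ]

theorem stepB_frozen (row : List Int) (m : Nat) (q : Int) (t : List Int) :
    (List.replicate m ()).foldl (fun s _ => stepB row s) (true, q, t) = (true, q, t) := by
  induction m with
  | zero => rfl
  | succ m ih => simpa [List.replicate_succ, List.foldl, stepB] using ih

theorem loopB_eq_runSpec (row : List Int) (k : Nat) (p : Int) (t : List Int) (fuel : Nat)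
    (hc : chainOkB row k p = true) (hf : k < fuel) :
    (List.replicate fuel ()).foldl (fun s _ => stepB row s) (false, p, t) =
      (true, (runSpec row k p t).1, (runSpec row k p t).2) := by
  induction k generalizing p t fuel with
  | zero =>
    match fuel, hf with
    | fuel + 1, _ =>
      simp only [chainOkB, beq_iff_eq] at hc
      rw [loopB_succ]
      have h1 : stepB row (false, p, t) = (true, p, t) := by simp [stepB, hc]
      rw [h1, stepB_frozen]
      simp [runSpec]
  | succ k ih =>
    match fuel, hf with
    | fuel + 1, hf =>
      simp only [chainOkB] at hc
      cases hg : PySem.List.pyGet? row p with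
      | none => simp [hg] at hc
      | some v =>
        rw [hg] at hc
        obtain ⟨hne, hrest⟩ := Bool.and_eq_true_iff.mp hc
        have hne' : ¬ (v == 0) = true := by simpa using hne
        rw [loopB_succ]
        have h1 : stepB row (false, p, t) = (false, p + v + 1, t ++ List.replicate (v + 1).toNat 1) := by
          simp [stepB, hg, hne']
        rw [h1, ih (p + v + 1) (t ++ List.replicate (v + 1).toNat 1) fuel hrest (by omega)]
        simp [runSpec, hg]

theorem deal_domain_name_spec : Claim_equal_deal_domain_name := by
  intro p row t _hDom hPre
  unfold Pre_deal_domain_name at hPre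
  rw [List.any_eq_true] at hPre
  obtain ⟨k, hk, hc⟩ := hPre
  rw [List.mem_range] at hk
  unfold Spec_deal_domain_name deal_domain_name deal_domain_name_alt
  rw [dealRecA_eq_runSpec row k p t _ hc hk, loopB_eq_runSpec row k p t _ hc hk]
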